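-- pv_equiv track=rewrite | github.com/rileywiley/aegis | aegis/web/breadcrumb.py | _get_label_for_path
-- ===== SOURCE A (Python) =====
-- _PATH_LABELS: dict[str, str] = {
--     "/": "Command Center",
--     "/meetings": "Meetings",
--     "/emails": "Emails",
--     "/asks": "Asks",
--     "/workstreams": "Workstreams",
--     "/departments": "Departments",
--     "/search": "Search Results",
--     "/readiness": "Readiness",
--     "/people": "People",
--     "/actions": "Actions",
--     "/org": "Org Chart",
--     "/respond": "Response",
--     "/admin": "Admin",
--     "/ask": "Ask Aegis",
-- }
--
-- def _get_label_for_path(path: str) -> str: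
--     """Get human-readable label for a URL path."""
--     # Strip query string if accidentally included
--     clean_path = path.split("?")[0]
--
--     # Exact match first
--     if clean_path in _PATH_LABELS:
--         return _PATH_LABELS[clean_path]
--
--     # Check prefix (e.g., /workstreams/123 -> "Workstream")
--     for prefix, label in _PATH_LABELS.items():
--         if prefix != "/" and clean_path.startswith(prefix + "/"):
--             # Singular form for detail pages
--             return label.rstrip("s") if label.endswith("s") else label
--
--     return "Back"
-- ===== SOURCE B (Python) =====
-- # B: instead of scanning the whole label table with startswith, compute the single
-- # candidate prefix directly (the text up to the second slash) and do one dict lookup.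
-- _PATH_LABELS: dict[str, str] = {
--     "/": "Command Center",
--     "/meetings": "Meetings",
--     "/emails": "Emails",
--     "/asks": "Asks",
--     "/workstreams": "Workstreams",
--     "/departments": "Departments",
--     "/search": "Search Results",
--     "/readiness": "Readiness",
--     "/people": "People",
--     "/actions": "Actions",
--     "/org": "Org Chart",
--     "/respond": "Response",
--     "/admin": "Admin",
--     "/ask": "Ask Aegis",
-- }
--
-- def _get_label_for_path(path: str) -> str:
--     """Get human-readable label for a URL path."""
--     clean_path = path.split("?")[0]
--     label = _PATH_LABELS.get(clean_path)
--     if label is not None: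
--         return label
--     i = clean_path.find("/", 1)
--     if i != -1:
--         prefix = clean_path[:i]
--         if prefix != "/":
--             label = _PATH_LABELS.get(prefix)
--             if label is not None:
--                 return label.rstrip("s") if label.endswith("s") else label
--     return "Back"
-- ===== Notes on version B (the rewrite author's own statement) =====
-- stated objective: simpler
-- what changed: Replaces the loop over all 14 table entries testing startswith(prefix + '/') with a direct computation of the only possible prefix (the text up to the second slash, located with a single str.find call from index 1) followed by a single dict lookup.
import Mathlib
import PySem

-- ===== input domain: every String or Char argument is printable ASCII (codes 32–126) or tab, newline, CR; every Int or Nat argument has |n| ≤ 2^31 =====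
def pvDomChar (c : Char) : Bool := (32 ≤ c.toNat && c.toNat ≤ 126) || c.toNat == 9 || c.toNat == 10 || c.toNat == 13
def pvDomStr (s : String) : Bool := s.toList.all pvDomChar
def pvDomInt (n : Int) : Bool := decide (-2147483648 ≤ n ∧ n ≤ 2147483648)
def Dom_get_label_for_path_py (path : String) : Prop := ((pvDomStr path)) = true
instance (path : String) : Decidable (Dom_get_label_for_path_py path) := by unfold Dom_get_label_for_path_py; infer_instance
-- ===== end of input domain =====

-- B replaces A's scan over all 14 table entries (a startswith test per entry) by computing the
-- single candidate prefix directly (the text up to the second slash, located with one find call)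
-- and doing one dict lookup; objective: simpler.


-- the module constant _PATH_LABELS (a dict literal with distinct keys)
def pvLabelsList : List (String × String) :=
  [("/", "Command Center"), ("/meetings", "Meetings"), ("/emails", "Emails"), ("/asks", "Asks"),
   ("/workstreams", "Workstreams"), ("/departments", "Departments"), ("/search", "Search Results"),
   ("/readiness", "Readiness"), ("/people", "People"), ("/actions", "Actions"), ("/org", "Org Chart"),
   ("/respond", "Response"), ("/admin", "Admin"), ("/ask", "Ask Aegis")]

def pvLabels : PySem.Dict String String := PySem.Dict.ofList pvLabelsList

-- hand port of label.rstrip("s"): drop trailing 's' characters; exact because the char set is the single ASCII char 's'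
def pvRstripS (s : String) : String := String.ofList ((s.toList.reverse.dropWhile (fun c => c == 's')).reverse)

-- ===== PORT A =====
-- the for-loop over _PATH_LABELS.items() with early return
def pvScan : List (String × String) → String → String
  | [], _ => "Back"
  | (pre, label) :: rest, clean_path =>
    if pre ≠ "/" ∧ PySem.Str.startswith clean_path (pre ++ "/") then
      (if PySem.Str.endswith label "s" then pvRstripS label else label)
    else pvScan rest clean_path

def get_label_for_path_py (path : String) : String :=
  let clean_path := ((PySem.Str.split? path "?").getD []).headD ""
  match PySem.Dict.get? pvLabels clean_path with
  | some l => l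
  | none => pvScan pvLabels.items clean_path

-- ===== PORT B =====
-- the fallback after the exact match: compute the prefix up to the second '/' and look it up once
def pvFallback (clean_path : String) : String :=
  let i := PySem.Str.findFrom clean_path "/" 1
  if i ≠ -1 then
    let prefix_ := PySem.Str.slice clean_path none (some i)
    if prefix_ ≠ "/" then
      match PySem.Dict.get? pvLabels prefix_ with
      | some label => if PySem.Str.endswith label "s" then pvRstripS label else label
      | none => "Back"
    else "Back"
  else "Back"

def get_label_for_path_py_alt (path : String) : String :=
  let clean_path := ((PySem.Str.split? path "?").getD []).headD ""
  match PySem.Dict.get? pvLabels clean_path with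
  | some l => l
  | none => pvFallback clean_path

-- ===== PRECONDITION & SPEC =====
def Spec_get_label_for_path_py (path : String) (out : String) : Prop := out = get_label_for_path_py_alt path
instance (path : String) (out : String) : Decidable (Spec_get_label_for_path_py path out) := by unfold Spec_get_label_for_path_py; infer_instance

-- ===== CLAIM (what is proved, stated in full; the proofs are below) =====
def Claim_equal_get_label_for_path_py : Prop := ∀ (path : String), Dom_get_label_for_path_py path → Spec_get_label_for_path_py path (get_label_for_path_py path)

-- ===== LEMMAS AND PROOFS =====

lemma pvSingletonPrefix (a : Char) (l : List Char) : [a] <+: l ↔ l.head? = some a := by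
  constructor
  · rintro ⟨t, rfl⟩; rfl
  · intro h
    cases l with
    | nil => simp at h
    | cons b t => simp at h; exact ⟨t, by simp [h]⟩

lemma pvFindIdxSpec (t : List Char) (j : Nat) (h : t.findIdx? (· == '/') = some j) :
    j < t.length ∧ t[j]? = some '/' ∧ ∀ i < j, t[i]? ≠ some '/' := by
  rw [List.findIdx?_eq_some_iff_getElem] at h
  obtain ⟨hj, hget, hmin⟩ := h
  refine ⟨hj, by simp [List.getElem?_eq_getElem hj]; simpa using hget, ?_⟩
  intro i hi hcontra
  have hil : i < t.length := by omega
  have := hmin i hi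
  simp [List.getElem?_eq_getElem hil] at hcontra
  simp [hcontra] at this

-- Chars.find on a single-character needle is findIdx?
lemma pvFind (t : List Char) :
    PySem.Chars.find t ['/'] = (t.findIdx? (· == '/')).elim (-1) (fun j => (j : Int)) := by
  cases hf : t.findIdx? (· == '/') with
  | none =>
    have hmem : '/' ∉ t := by
      rw [List.findIdx?_eq_none_iff] at hf
      intro hm; have := hf _ hm; simp at this
    simp [(PySem.Chars.find_eq_neg_one_iff t ['/']).mpr (by simpa [List.singleton_infix_iff] using hmem)]
  | some j =>
    obtain ⟨hj, hget, hmin⟩ := pvFindIdxSpec t j hf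
    have hne : PySem.Chars.find t ['/'] ≠ -1 := by
      rw [Ne, PySem.Chars.find_eq_neg_one_iff, List.singleton_infix_iff]
      simp only [not_not]
      exact List.mem_of_getElem? hget
    have hspec := PySem.Chars.findFrom_natCast_spec t ['/'] 0 (Nat.zero_le _)
        (by simpa [PySem.Chars.findFrom_zero] using hne)
    simp only [Nat.cast_zero, PySem.Chars.findFrom_zero] at hspec
    obtain ⟨h0, hpre, hminF⟩ := hspec
    set n := (PySem.Chars.find t ['/']).toNat with hn
    have hslash : t[n]? = some '/' := by
      rw [← List.head?_drop]; exact (pvSingletonPrefix _ _).mp hpre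
    have hnj : n = j := by
      by_contra hne'
      rcases Nat.lt_or_ge n j with hlt | hge
      · exact hmin n hlt hslash
      · have hjn : j < n := by omega
        exact hminF j (Nat.zero_le _) hjn ((pvSingletonPrefix _ _).mpr (by rw [List.head?_drop]; exact hget))
    have : PySem.Chars.find t ['/'] = (n : Int) := by omega
    simp [this, hnj]

-- findFrom from index 1 on a nonempty string
lemma pvFindFrom (c : Char) (t : List Char) :
    PySem.Chars.findFrom (c :: t) ['/'] 1 =
      (t.findIdx? (· == '/')).elim (-1) (fun j => ((j : Int) + 1)) := by
  have h := PySem.Chars.findFrom_natCast (c :: t) ['/'] 1 (by simp)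
  simp only [List.drop_one, List.tail_cons] at h
  rw [show ((1 : Nat) : Int) = (1 : Int) from rfl] at h
  rw [h, pvFind]
  cases t.findIdx? (· == '/') with
  | none => simp
  | some j => simp [Option.elim]; omega

-- which strings a key (slash, then a nonempty slash-free word) followed by a slash are a prefix of
lemma pvKeyIff (c : Char) (t w : List Char) (hw : '/' ∉ w) (_hw0 : w ≠ []) :
    ('/' :: (w ++ ['/'])) <+: (c :: t) ↔
      (c = '/' ∧ t.findIdx? (· == '/') = some w.length ∧ t.take w.length = w) := by
  constructor
  · intro h
    rw [List.cons_prefix_cons] at h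
    obtain ⟨hc, hpre⟩ := h
    replace hc := hc.symm
    obtain ⟨r, hr⟩ := hpre
    rw [List.append_assoc] at hr
    refine ⟨hc, ?_, ?_⟩
    · rw [← hr, List.findIdx?_append]
      have hwnone : w.findIdx? (· == '/') = none := by
        rw [List.findIdx?_eq_none_iff]; intro x hx; simp; rintro rfl; exact hw hx
      simp [hwnone, List.findIdx?_cons]
    · rw [← hr, List.take_append_of_le_length (le_refl _), List.take_length]
  · rintro ⟨hc, hfind, htake⟩
    obtain ⟨hj, hget, -⟩ := pvFindIdxSpec t w.length hfind
    subst hc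
    rw [List.cons_prefix_cons]
    refine ⟨rfl, ?_⟩
    have hsplit : t = w ++ t.drop w.length := by
      conv_lhs => rw [← List.take_append_drop w.length t, htake]
    have hdrop : (t.drop w.length).head? = some '/' := by rw [List.head?_drop]; exact hget
    obtain ⟨r, hr⟩ : ∃ r, t.drop w.length = '/' :: r := by
      cases hd : t.drop w.length with
      | nil => rw [hd] at hdrop; simp at hdrop
      | cons a r => rw [hd] at hdrop; simp at hdrop; exact ⟨r, by rw [hdrop]⟩
    refine ⟨r, ?_⟩
    rw [List.append_assoc]
    simpa [hr] using hsplit.symm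

-- startswith of a literal key ++ "/" in terms of the second-slash position
lemma pvSW (cp : String) (c : Char) (t : List Char) (h : cp.toList = c :: t)
    (K : String) (w : List Char) (hK : K.toList = '/' :: w) (hw : '/' ∉ w) (hw0 : w ≠ []) :
    (PySem.Str.startswith cp (K ++ "/") = true) ↔
      (c = '/' ∧ t.findIdx? (· == '/') = some w.length ∧ t.take w.length = w) := by
  rw [PySem.Str.startswith_eq, PySem.Chars.startswith_iff, String.toList_append, hK, h]
  have : ("/" : String).toList = ['/'] := rfl
  rw [this, ← pvKeyIff c t w hw hw0]
  simp

lemma pvCond (t w : List Char) (j : Nat) (hj : j < t.length) :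
    ((some j : Option Nat) = some w.length ∧ t.take w.length = w) ↔ t.take j = w := by
  constructor
  · rintro ⟨hje, htake⟩; simp at hje; rw [hje]; exact htake
  · intro h
    have : (t.take j).length = j := by simp; omega
    rw [h] at this
    exact ⟨by rw [this], by rw [this]; exact h⟩

lemma pvItems : pvLabels.items = pvLabelsList := by decide

lemma pvBoolEq (b : Bool) (P : Prop) [Decidable P] (h : b = true ↔ P) : b = decide P := by
  rcases Bool.eq_false_or_eq_true b with hb | hb <;> rw [hb] <;> simp [← h, hb]

lemma pvSWnil (cp : String) (h : cp.toList = []) (K : String) :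
    PySem.Str.startswith cp (K ++ "/") = false := by
  rw [Bool.eq_false_iff, Ne, PySem.Str.startswith_eq, PySem.Chars.startswith_iff, h]
  intro hp
  have := hp.length_le
  simp [String.toList_append] at this

-- pvSW with the found slash index substituted in (j = the index of the first slash of t)
lemma pvSW2 (cp : String) (c : Char) (t : List Char) (hcs : cp.toList = c :: t)
    (j : Nat) (hj : t.findIdx? (· == '/') = some j) (hjlen : j < t.length)
    (K : String) (w : List Char) (hK : K.toList = '/' :: w) (hw : '/' ∉ w) (hw0 : w ≠ []) :
    (PySem.Str.startswith cp (K ++ "/") = true) ↔ (c = '/' ∧ t.take j = w) := by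
  rw [pvSW cp c t hcs K w hK hw hw0, hj, and_congr_right_iff]
  intro _
  exact pvCond t w j hjlen

-- the main lemma: A's scan over the table equals B's computed-prefix fallback
lemma pvMain (cp : String) : pvScan pvLabels.items cp = pvFallback cp := by
  rw [pvItems]
  cases hcs : cp.toList with
  | nil =>
    have hff : PySem.Chars.findFrom cp.toList ['/'] 1 = -1 := by rw [hcs]; decide
    simp only [pvScan, pvLabelsList, pvSWnil cp hcs]
    simp [pvFallback, hff]
  | cons c t =>
    have hff : PySem.Chars.findFrom cp.toList ['/'] 1 =
        (t.findIdx? (· == '/')).elim (-1) (fun j => ((j : Int) + 1)) := by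
      rw [hcs]; exact pvFindFrom c t
    cases hj : t.findIdx? (· == '/') with
    | none =>
      have hswf : ∀ (K : String) (w : List Char), K.toList = '/' :: w → '/' ∉ w → w ≠ [] →
          PySem.Str.startswith cp (K ++ "/") = false := by
        intro K w hK hw hw0
        rw [Bool.eq_false_iff, Ne, pvSW cp c t hcs K w hK hw hw0]
        rintro ⟨-, hfind, -⟩
        rw [hj] at hfind
        simp at hfind
      simp only [pvScan, pvLabelsList,
        hswf "/meetings" ['m', 'e', 'e', 't', 'i', 'n', 'g', 's'] (by decide) (by decide) (by decide),
        hswf "/emails" ['e', 'm', 'a', 'i', 'l', 's'] (by decide) (by decide) (by decide),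
        hswf "/asks" ['a', 's', 'k', 's'] (by decide) (by decide) (by decide),
        hswf "/workstreams" ['w', 'o', 'r', 'k', 's', 't', 'r', 'e', 'a', 'm', 's'] (by decide) (by decide) (by decide),
        hswf "/departments" ['d', 'e', 'p', 'a', 'r', 't', 'm', 'e', 'n', 't', 's'] (by decide) (by decide) (by decide),
        hswf "/search" ['s', 'e', 'a', 'r', 'c', 'h'] (by decide) (by decide) (by decide),
        hswf "/readiness" ['r', 'e', 'a', 'd', 'i', 'n', 'e', 's', 's'] (by decide) (by decide) (by decide),
        hswf "/people" ['p', 'e', 'o', 'p', 'l', 'e'] (by decide) (by decide) (by decide),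
        hswf "/actions" ['a', 'c', 't', 'i', 'o', 'n', 's'] (by decide) (by decide) (by decide),
        hswf "/org" ['o', 'r', 'g'] (by decide) (by decide) (by decide),
        hswf "/respond" ['r', 'e', 's', 'p', 'o', 'n', 'd'] (by decide) (by decide) (by decide),
        hswf "/admin" ['a', 'd', 'm', 'i', 'n'] (by decide) (by decide) (by decide),
        hswf "/ask" ['a', 's', 'k'] (by decide) (by decide) (by decide)]
      simp [pvFallback, hff, hj]
    | some j =>
      obtain ⟨hjlen, hget, -⟩ := pvFindIdxSpec t j hj
      have hswB : ∀ (K : String) (w : List Char), K.toList = '/' :: w → '/' ∉ w → w ≠ [] →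
          PySem.Str.startswith cp (K ++ "/") = decide (c = '/' ∧ t.take j = w) := by
        intro K w hK hw hw0
        exact pvBoolEq _ _ (pvSW2 cp c t hcs j hj hjlen K w hK hw hw0)
      have hi : PySem.Str.findFrom cp "/" 1 = (j : Int) + 1 := by
        simp only [PySem.Str.findFrom_eq]
        rw [show ("/" : String).toList = ['/'] from rfl, hff, hj]
        rfl
      have hic : PySem.Chars.findFrom cp.toList ['/'] 1 = (j : Int) + 1 := by
        rw [hff, hj]; rfl
      have hne : ((j : Int) + 1) ≠ -1 := by omega
      have hpre : (PySem.Str.slice cp none (some ((j : Int) + 1))).toList = c :: t.take j := by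
        rw [PySem.Str.toList_slice, PySem.Chars.slice_eq_listSlice,
          show ((j : Int) + 1) = ((j + 1 : Nat) : Int) by push_cast; ring,
          PySem.List.slice_to _ (by positivity), Int.toNat_natCast, hcs, List.take_succ_cons]
      have hpreC : ∀ (K : String) (w : List Char), K.toList = '/' :: w →
          ((PySem.Str.slice cp none (some ((j : Int) + 1)) = K) ↔ (c = '/' ∧ t.take j = w)) := by
        intro K w hK
        rw [← String.toList_inj, hpre, hK, List.cons.injEq]
      have hbeq : ∀ (K : String) (w : List Char), K.toList = '/' :: w →
          ((K == PySem.Str.slice cp none (some ((j : Int) + 1))) = decide (c = '/' ∧ t.take j = w)) := by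
        intro K w hK
        exact pvBoolEq _ _ (by rw [beq_iff_eq, eq_comm]; exact hpreC K w hK)
      simp only [pvScan, pvLabelsList,
        hswB "/meetings" ['m', 'e', 'e', 't', 'i', 'n', 'g', 's'] (by decide) (by decide) (by decide),
        hswB "/emails" ['e', 'm', 'a', 'i', 'l', 's'] (by decide) (by decide) (by decide),
        hswB "/asks" ['a', 's', 'k', 's'] (by decide) (by decide) (by decide),
        hswB "/workstreams" ['w', 'o', 'r', 'k', 's', 't', 'r', 'e', 'a', 'm', 's'] (by decide) (by decide) (by decide),
        hswB "/departments" ['d', 'e', 'p', 'a', 'r', 't', 'm', 'e', 'n', 't', 's'] (by decide) (by decide) (by decide),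
        hswB "/search" ['s', 'e', 'a', 'r', 'c', 'h'] (by decide) (by decide) (by decide),
        hswB "/readiness" ['r', 'e', 'a', 'd', 'i', 'n', 'e', 's', 's'] (by decide) (by decide) (by decide),
        hswB "/people" ['p', 'e', 'o', 'p', 'l', 'e'] (by decide) (by decide) (by decide),
        hswB "/actions" ['a', 'c', 't', 'i', 'o', 'n', 's'] (by decide) (by decide) (by decide),
        hswB "/org" ['o', 'r', 'g'] (by decide) (by decide) (by decide),
        hswB "/respond" ['r', 'e', 's', 'p', 'o', 'n', 'd'] (by decide) (by decide) (by decide),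
        hswB "/admin" ['a', 'd', 'm', 'i', 'n'] (by decide) (by decide) (by decide),
        hswB "/ask" ['a', 's', 'k'] (by decide) (by decide) (by decide)]
      by_cases hc : c = '/'
      case neg =>
        simp [pvFallback, hic, hne, hpreC "/" [] (by decide), PySem.Dict.get?, pvItems, pvLabelsList, List.find?,
          hbeq "/" [] (by decide),
          hbeq "/meetings" ['m', 'e', 'e', 't', 'i', 'n', 'g', 's'] (by decide),
          hbeq "/emails" ['e', 'm', 'a', 'i', 'l', 's'] (by decide),
          hbeq "/asks" ['a', 's', 'k', 's'] (by decide),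
          hbeq "/workstreams" ['w', 'o', 'r', 'k', 's', 't', 'r', 'e', 'a', 'm', 's'] (by decide),
          hbeq "/departments" ['d', 'e', 'p', 'a', 'r', 't', 'm', 'e', 'n', 't', 's'] (by decide),
          hbeq "/search" ['s', 'e', 'a', 'r', 'c', 'h'] (by decide),
          hbeq "/readiness" ['r', 'e', 'a', 'd', 'i', 'n', 'e', 's', 's'] (by decide),
          hbeq "/people" ['p', 'e', 'o', 'p', 'l', 'e'] (by decide),
          hbeq "/actions" ['a', 'c', 't', 'i', 'o', 'n', 's'] (by decide),
          hbeq "/org" ['o', 'r', 'g'] (by decide),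
          hbeq "/respond" ['r', 'e', 's', 'p', 'o', 'n', 'd'] (by decide),
          hbeq "/admin" ['a', 'd', 'm', 'i', 'n'] (by decide),
          hbeq "/ask" ['a', 's', 'k'] (by decide), hc]
      by_cases h0 : t.take j = []
      · simp [pvFallback, hic, hne, hpreC "/" [] (by decide), hc, h0]
      by_cases h1 : t.take j = ['m', 'e', 'e', 't', 'i', 'n', 'g', 's']
      · simp [pvFallback, hic, hne, hpreC "/" [] (by decide), PySem.Dict.get?, pvItems, pvLabelsList, List.find?, hbeq "/" [] (by decide),
          hbeq "/meetings" ['m', 'e', 'e', 't', 'i', 'n', 'g', 's'] (by decide), hc, h1]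
      by_cases h2 : t.take j = ['e', 'm', 'a', 'i', 'l', 's']
      · simp [pvFallback, hic, hne, hpreC "/" [] (by decide), PySem.Dict.get?, pvItems, pvLabelsList, List.find?, hbeq "/" [] (by decide),
          hbeq "/meetings" ['m', 'e', 'e', 't', 'i', 'n', 'g', 's'] (by decide),
          hbeq "/emails" ['e', 'm', 'a', 'i', 'l', 's'] (by decide), hc, h2]
      by_cases h3 : t.take j = ['a', 's', 'k', 's']
      · simp [pvFallback, hic, hne, hpreC "/" [] (by decide), PySem.Dict.get?, pvItems, pvLabelsList, List.find?, hbeq "/" [] (by decide),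
          hbeq "/meetings" ['m', 'e', 'e', 't', 'i', 'n', 'g', 's'] (by decide),
          hbeq "/emails" ['e', 'm', 'a', 'i', 'l', 's'] (by decide),
          hbeq "/asks" ['a', 's', 'k', 's'] (by decide), hc, h3]
      by_cases h4 : t.take j = ['w', 'o', 'r', 'k', 's', 't', 'r', 'e', 'a', 'm', 's']
      · simp [pvFallback, hic, hne, hpreC "/" [] (by decide), PySem.Dict.get?, pvItems, pvLabelsList, List.find?, hbeq "/" [] (by decide),
          hbeq "/meetings" ['m', 'e', 'e', 't', 'i', 'n', 'g', 's'] (by decide),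
          hbeq "/emails" ['e', 'm', 'a', 'i', 'l', 's'] (by decide),
          hbeq "/asks" ['a', 's', 'k', 's'] (by decide),
          hbeq "/workstreams" ['w', 'o', 'r', 'k', 's', 't', 'r', 'e', 'a', 'm', 's'] (by decide), hc, h4]
      by_cases h5 : t.take j = ['d', 'e', 'p', 'a', 'r', 't', 'm', 'e', 'n', 't', 's']
      · simp [pvFallback, hic, hne, hpreC "/" [] (by decide), PySem.Dict.get?, pvItems, pvLabelsList, List.find?, hbeq "/" [] (by decide),
          hbeq "/meetings" ['m', 'e', 'e', 't', 'i', 'n', 'g', 's'] (by decide),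
          hbeq "/emails" ['e', 'm', 'a', 'i', 'l', 's'] (by decide),
          hbeq "/asks" ['a', 's', 'k', 's'] (by decide),
          hbeq "/workstreams" ['w', 'o', 'r', 'k', 's', 't', 'r', 'e', 'a', 'm', 's'] (by decide),
          hbeq "/departments" ['d', 'e', 'p', 'a', 'r', 't', 'm', 'e', 'n', 't', 's'] (by decide), hc, h5]
      by_cases h6 : t.take j = ['s', 'e', 'a', 'r', 'c', 'h']
      · simp [pvFallback, hic, hne, hpreC "/" [] (by decide), PySem.Dict.get?, pvItems, pvLabelsList, List.find?, hbeq "/" [] (by decide),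
          hbeq "/meetings" ['m', 'e', 'e', 't', 'i', 'n', 'g', 's'] (by decide),
          hbeq "/emails" ['e', 'm', 'a', 'i', 'l', 's'] (by decide),
          hbeq "/asks" ['a', 's', 'k', 's'] (by decide),
          hbeq "/workstreams" ['w', 'o', 'r', 'k', 's', 't', 'r', 'e', 'a', 'm', 's'] (by decide),
          hbeq "/departments" ['d', 'e', 'p', 'a', 'r', 't', 'm', 'e', 'n', 't', 's'] (by decide),
          hbeq "/search" ['s', 'e', 'a', 'r', 'c', 'h'] (by decide), hc, h6]
      by_cases h7 : t.take j = ['r', 'e', 'a', 'd', 'i', 'n', 'e', 's', 's']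
      · simp [pvFallback, hic, hne, hpreC "/" [] (by decide), PySem.Dict.get?, pvItems, pvLabelsList, List.find?, hbeq "/" [] (by decide),
          hbeq "/meetings" ['m', 'e', 'e', 't', 'i', 'n', 'g', 's'] (by decide),
          hbeq "/emails" ['e', 'm', 'a', 'i', 'l', 's'] (by decide),
          hbeq "/asks" ['a', 's', 'k', 's'] (by decide),
          hbeq "/workstreams" ['w', 'o', 'r', 'k', 's', 't', 'r', 'e', 'a', 'm', 's'] (by decide),
          hbeq "/departments" ['d', 'e', 'p', 'a', 'r', 't', 'm', 'e', 'n', 't', 's'] (by decide),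
          hbeq "/search" ['s', 'e', 'a', 'r', 'c', 'h'] (by decide),
          hbeq "/readiness" ['r', 'e', 'a', 'd', 'i', 'n', 'e', 's', 's'] (by decide), hc, h7]
      by_cases h8 : t.take j = ['p', 'e', 'o', 'p', 'l', 'e']
      · simp [pvFallback, hic, hne, hpreC "/" [] (by decide), PySem.Dict.get?, pvItems, pvLabelsList, List.find?, hbeq "/" [] (by decide),
          hbeq "/meetings" ['m', 'e', 'e', 't', 'i', 'n', 'g', 's'] (by decide),
          hbeq "/emails" ['e', 'm', 'a', 'i', 'l', 's'] (by decide),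
          hbeq "/asks" ['a', 's', 'k', 's'] (by decide),
          hbeq "/workstreams" ['w', 'o', 'r', 'k', 's', 't', 'r', 'e', 'a', 'm', 's'] (by decide),
          hbeq "/departments" ['d', 'e', 'p', 'a', 'r', 't', 'm', 'e', 'n', 't', 's'] (by decide),
          hbeq "/search" ['s', 'e', 'a', 'r', 'c', 'h'] (by decide),
          hbeq "/readiness" ['r', 'e', 'a', 'd', 'i', 'n', 'e', 's', 's'] (by decide),
          hbeq "/people" ['p', 'e', 'o', 'p', 'l', 'e'] (by decide), hc, h8]
      by_cases h9 : t.take j = ['a', 'c', 't', 'i', 'o', 'n', 's']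
      · simp [pvFallback, hic, hne, hpreC "/" [] (by decide), PySem.Dict.get?, pvItems, pvLabelsList, List.find?, hbeq "/" [] (by decide),
          hbeq "/meetings" ['m', 'e', 'e', 't', 'i', 'n', 'g', 's'] (by decide),
          hbeq "/emails" ['e', 'm', 'a', 'i', 'l', 's'] (by decide),
          hbeq "/asks" ['a', 's', 'k', 's'] (by decide),
          hbeq "/workstreams" ['w', 'o', 'r', 'k', 's', 't', 'r', 'e', 'a', 'm', 's'] (by decide),
          hbeq "/departments" ['d', 'e', 'p', 'a', 'r', 't', 'm', 'e', 'n', 't', 's'] (by decide),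
          hbeq "/search" ['s', 'e', 'a', 'r', 'c', 'h'] (by decide),
          hbeq "/readiness" ['r', 'e', 'a', 'd', 'i', 'n', 'e', 's', 's'] (by decide),
          hbeq "/people" ['p', 'e', 'o', 'p', 'l', 'e'] (by decide),
          hbeq "/actions" ['a', 'c', 't', 'i', 'o', 'n', 's'] (by decide), hc, h9]
      by_cases h10 : t.take j = ['o', 'r', 'g']
      · simp [pvFallback, hic, hne, hpreC "/" [] (by decide), PySem.Dict.get?, pvItems, pvLabelsList, List.find?, hbeq "/" [] (by decide),
          hbeq "/meetings" ['m', 'e', 'e', 't', 'i', 'n', 'g', 's'] (by decide),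
          hbeq "/emails" ['e', 'm', 'a', 'i', 'l', 's'] (by decide),
          hbeq "/asks" ['a', 's', 'k', 's'] (by decide),
          hbeq "/workstreams" ['w', 'o', 'r', 'k', 's', 't', 'r', 'e', 'a', 'm', 's'] (by decide),
          hbeq "/departments" ['d', 'e', 'p', 'a', 'r', 't', 'm', 'e', 'n', 't', 's'] (by decide),
          hbeq "/search" ['s', 'e', 'a', 'r', 'c', 'h'] (by decide),
          hbeq "/readiness" ['r', 'e', 'a', 'd', 'i', 'n', 'e', 's', 's'] (by decide),
          hbeq "/people" ['p', 'e', 'o', 'p', 'l', 'e'] (by decide),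
          hbeq "/actions" ['a', 'c', 't', 'i', 'o', 'n', 's'] (by decide),
          hbeq "/org" ['o', 'r', 'g'] (by decide), hc, h10]
      by_cases h11 : t.take j = ['r', 'e', 's', 'p', 'o', 'n', 'd']
      · simp [pvFallback, hic, hne, hpreC "/" [] (by decide), PySem.Dict.get?, pvItems, pvLabelsList, List.find?, hbeq "/" [] (by decide),
          hbeq "/meetings" ['m', 'e', 'e', 't', 'i', 'n', 'g', 's'] (by decide),
          hbeq "/emails" ['e', 'm', 'a', 'i', 'l', 's'] (by decide),
          hbeq "/asks" ['a', 's', 'k', 's'] (by decide),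
          hbeq "/workstreams" ['w', 'o', 'r', 'k', 's', 't', 'r', 'e', 'a', 'm', 's'] (by decide),
          hbeq "/departments" ['d', 'e', 'p', 'a', 'r', 't', 'm', 'e', 'n', 't', 's'] (by decide),
          hbeq "/search" ['s', 'e', 'a', 'r', 'c', 'h'] (by decide),
          hbeq "/readiness" ['r', 'e', 'a', 'd', 'i', 'n', 'e', 's', 's'] (by decide),
          hbeq "/people" ['p', 'e', 'o', 'p', 'l', 'e'] (by decide),
          hbeq "/actions" ['a', 'c', 't', 'i', 'o', 'n', 's'] (by decide),
          hbeq "/org" ['o', 'r', 'g'] (by decide),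
          hbeq "/respond" ['r', 'e', 's', 'p', 'o', 'n', 'd'] (by decide), hc, h11]
      by_cases h12 : t.take j = ['a', 'd', 'm', 'i', 'n']
      · simp [pvFallback, hic, hne, hpreC "/" [] (by decide), PySem.Dict.get?, pvItems, pvLabelsList, List.find?, hbeq "/" [] (by decide),
          hbeq "/meetings" ['m', 'e', 'e', 't', 'i', 'n', 'g', 's'] (by decide),
          hbeq "/emails" ['e', 'm', 'a', 'i', 'l', 's'] (by decide),
          hbeq "/asks" ['a', 's', 'k', 's'] (by decide),
          hbeq "/workstreams" ['w', 'o', 'r', 'k', 's', 't', 'r', 'e', 'a', 'm', 's'] (by decide),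
          hbeq "/departments" ['d', 'e', 'p', 'a', 'r', 't', 'm', 'e', 'n', 't', 's'] (by decide),
          hbeq "/search" ['s', 'e', 'a', 'r', 'c', 'h'] (by decide),
          hbeq "/readiness" ['r', 'e', 'a', 'd', 'i', 'n', 'e', 's', 's'] (by decide),
          hbeq "/people" ['p', 'e', 'o', 'p', 'l', 'e'] (by decide),
          hbeq "/actions" ['a', 'c', 't', 'i', 'o', 'n', 's'] (by decide),
          hbeq "/org" ['o', 'r', 'g'] (by decide),
          hbeq "/respond" ['r', 'e', 's', 'p', 'o', 'n', 'd'] (by decide),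
          hbeq "/admin" ['a', 'd', 'm', 'i', 'n'] (by decide), hc, h12]
      by_cases h13 : t.take j = ['a', 's', 'k']
      · simp [pvFallback, hic, hne, hpreC "/" [] (by decide), PySem.Dict.get?, pvItems, pvLabelsList, List.find?, hbeq "/" [] (by decide),
          hbeq "/meetings" ['m', 'e', 'e', 't', 'i', 'n', 'g', 's'] (by decide),
          hbeq "/emails" ['e', 'm', 'a', 'i', 'l', 's'] (by decide),
          hbeq "/asks" ['a', 's', 'k', 's'] (by decide),
          hbeq "/workstreams" ['w', 'o', 'r', 'k', 's', 't', 'r', 'e', 'a', 'm', 's'] (by decide),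
          hbeq "/departments" ['d', 'e', 'p', 'a', 'r', 't', 'm', 'e', 'n', 't', 's'] (by decide),
          hbeq "/search" ['s', 'e', 'a', 'r', 'c', 'h'] (by decide),
          hbeq "/readiness" ['r', 'e', 'a', 'd', 'i', 'n', 'e', 's', 's'] (by decide),
          hbeq "/people" ['p', 'e', 'o', 'p', 'l', 'e'] (by decide),
          hbeq "/actions" ['a', 'c', 't', 'i', 'o', 'n', 's'] (by decide),
          hbeq "/org" ['o', 'r', 'g'] (by decide),
          hbeq "/respond" ['r', 'e', 's', 'p', 'o', 'n', 'd'] (by decide),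
          hbeq "/admin" ['a', 'd', 'm', 'i', 'n'] (by decide),
          hbeq "/ask" ['a', 's', 'k'] (by decide), hc, h13]
      simp [pvFallback, hic, hne, hpreC "/" [] (by decide), PySem.Dict.get?, pvItems, pvLabelsList, List.find?, hbeq "/" [] (by decide),
          hbeq "/meetings" ['m', 'e', 'e', 't', 'i', 'n', 'g', 's'] (by decide),
          hbeq "/emails" ['e', 'm', 'a', 'i', 'l', 's'] (by decide),
          hbeq "/asks" ['a', 's', 'k', 's'] (by decide),
          hbeq "/workstreams" ['w', 'o', 'r', 'k', 's', 't', 'r', 'e', 'a', 'm', 's'] (by decide),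
          hbeq "/departments" ['d', 'e', 'p', 'a', 'r', 't', 'm', 'e', 'n', 't', 's'] (by decide),
          hbeq "/search" ['s', 'e', 'a', 'r', 'c', 'h'] (by decide),
          hbeq "/readiness" ['r', 'e', 'a', 'd', 'i', 'n', 'e', 's', 's'] (by decide),
          hbeq "/people" ['p', 'e', 'o', 'p', 'l', 'e'] (by decide),
          hbeq "/actions" ['a', 'c', 't', 'i', 'o', 'n', 's'] (by decide),
          hbeq "/org" ['o', 'r', 'g'] (by decide),
          hbeq "/respond" ['r', 'e', 's', 'p', 'o', 'n', 'd'] (by decide),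
          hbeq "/admin" ['a', 'd', 'm', 'i', 'n'] (by decide),
          hbeq "/ask" ['a', 's', 'k'] (by decide), hc, h0, h1, h2, h3, h4, h5, h6, h7, h8, h9, h10, h11, h12, h13]

-- ===== VERDICT (by name: the statement is the Claim_ definition above) =====
theorem get_label_for_path_py_spec : Claim_equal_get_label_for_path_py := by
  intro path _
  unfold Spec_get_label_for_path_py get_label_for_path_py get_label_for_path_py_alt
  dsimp only
  generalize (((PySem.Str.split? path "?").getD []).headD "") = q
  cases PySem.Dict.get? pvLabels q with
  | some l => rfl
  | none => exact pvMain q
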